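-- pv_equiv track=rewrite | github.com/strickyak/gforth-transpiler | mkdefs.py | Esc
-- ===== SOURCE A (Python) =====
-- def Esc(s):
--     z = ''
--     for ch in s:
--         if '0' <= ch <= '9': z += ch
--         elif 'A' <= ch <= 'Z': z += ch
--         elif 'a' <= ch <= 'z': z += ch
--         else:
--             z += '_%d_' % ord(ch)
--     return z
-- ===== SOURCE B (Python) =====
-- import re
--
-- _NONALNUM = re.compile(r'[^0-9A-Za-z]')
--
-- def Esc(s):
--     return _NONALNUM.sub(lambda m: '_%d_' % ord(m.group()), s)
-- ===== Notes on version B (the rewrite author's own statement) =====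
-- stated objective: faster
-- what changed: Replaces the explicit per-character loop with string concatenation by a single compiled-regex substitution over the ASCII class [^0-9A-Za-z], the replacement computed per match.
import Mathlib
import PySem

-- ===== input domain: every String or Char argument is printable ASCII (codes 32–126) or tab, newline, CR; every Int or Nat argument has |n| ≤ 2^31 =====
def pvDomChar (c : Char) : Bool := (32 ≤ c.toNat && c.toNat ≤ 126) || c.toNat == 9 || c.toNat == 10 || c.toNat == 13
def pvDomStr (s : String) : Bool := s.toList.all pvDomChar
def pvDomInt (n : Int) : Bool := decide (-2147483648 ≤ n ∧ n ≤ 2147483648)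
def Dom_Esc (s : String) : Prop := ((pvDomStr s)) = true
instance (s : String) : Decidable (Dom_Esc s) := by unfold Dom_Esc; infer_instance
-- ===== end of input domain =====

-- B replaces the explicit character loop with a single regex substitution (idiomatic); same output.


-- ===== PORT A =====
-- literal loop: accumulate z, branching on the three ranges in order
def Esc (s : String) : String :=
  s.toList.foldl (fun z ch =>
    if '0' ≤ ch ∧ ch ≤ '9' then z ++ String.ofList [ch]
    else if 'A' ≤ ch ∧ ch ≤ 'Z' then z ++ String.ofList [ch]
    else if 'a' ≤ ch ∧ ch ≤ 'z' then z ++ String.ofList [ch]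
    else z ++ "_" ++ PySem.Int.toStr (Int.ofNat ch.toNat) ++ "_") ""

-- ===== PORT B =====
-- regex sub: every char matching [^0-9A-Za-z] is replaced by '_%d_' % ord, the rest kept
def strJoin : List String → String
  | [] => ""
  | x :: t => x ++ strJoin t

def escRepl (ch : Char) : String := "_" ++ PySem.Int.toStr (Int.ofNat ch.toNat) ++ "_"

def Esc_alt (s : String) : String :=
  strJoin (s.toList.map (fun ch =>
    if ¬ (('0' ≤ ch ∧ ch ≤ '9') ∨ ('A' ≤ ch ∧ ch ≤ 'Z') ∨ ('a' ≤ ch ∧ ch ≤ 'z'))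
    then escRepl ch else String.ofList [ch]))

-- ===== PRECONDITION & SPEC =====
def Spec_Esc (s : String) (out : String) : Prop := out = Esc_alt s
instance (s : String) (out : String) : Decidable (Spec_Esc s out) := by unfold Spec_Esc; infer_instance

-- ===== CLAIM =====
def Claim_equal_Esc : Prop := ∀ (s : String), Dom_Esc s → Spec_Esc s (Esc s)

-- ===== LEMMAS AND PROOFS =====
lemma esc_loop (l : List Char) (acc : String) :
    l.foldl (fun z ch =>
      if '0' ≤ ch ∧ ch ≤ '9' then z ++ String.ofList [ch]
      else if 'A' ≤ ch ∧ ch ≤ 'Z' then z ++ String.ofList [ch]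
      else if 'a' ≤ ch ∧ ch ≤ 'z' then z ++ String.ofList [ch]
      else z ++ "_" ++ PySem.Int.toStr (Int.ofNat ch.toNat) ++ "_") acc
    = acc ++ strJoin (l.map (fun ch =>
        if ¬ (('0' ≤ ch ∧ ch ≤ '9') ∨ ('A' ≤ ch ∧ ch ≤ 'Z') ∨ ('a' ≤ ch ∧ ch ≤ 'z'))
        then escRepl ch else String.ofList [ch])) := by
  induction l generalizing acc with
  | nil => simp [strJoin]
  | cons ch t ih =>
    rw [List.map_cons, List.foldl_cons, ih, strJoin]
    by_cases h1 : '0' ≤ ch ∧ ch ≤ '9' <;> by_cases h2 : 'A' ≤ ch ∧ ch ≤ 'Z' <;>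
      by_cases h3 : 'a' ≤ ch ∧ ch ≤ 'z' <;>
      simp [h1, h2, h3, escRepl, String.append_assoc]

-- ===== VERDICT =====
theorem Esc_spec : Claim_equal_Esc := by
  intro s _
  unfold Spec_Esc Esc Esc_alt
  rw [esc_loop]
  simp
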